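-- pv_equiv track=rewrite | github.com/tlebryk/chineseflashcards | example_gen.py | paren_match
-- ===== SOURCE A (Python) =====
-- def paren_match(myStr):
--     stack = []
--     for ind, letter in enumerate(myStr[:-1]):
--         if letter == "(":
--             stack.append(ind)
--         elif letter == ")":
--             if len(stack) > 0:
--                 stack.pop()
--     if stack and len(stack) ==1:
--         return stack[0]
--     else:
--         return None
-- ===== SOURCE B (Python) =====
-- def paren_match(myStr):
--     # Right-to-left scan: count unmatched ')' seen so far; a '(' with no
--     # pending close to its right is an unmatched open. The last one found
--     # (leftmost in the string) is the answer iff exactly one exists.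
--     s = myStr[:-1]
--     closes = 0
--     unmatched_opens = 0
--     ans = None
--     for i in range(len(s) - 1, -1, -1):
--         ch = s[i]
--         if ch == ")":
--             closes += 1
--         elif ch == "(":
--             if closes > 0:
--                 closes -= 1
--             else:
--                 ans = i
--                 unmatched_opens += 1
--     return ans if unmatched_opens == 1 else None
-- ===== Notes on version B (the rewrite author's own statement) =====
-- stated objective: alternative
-- what changed: Scans right-to-left instead of left-to-right: it keeps a count of pending unmatched ')' and detects each unmatched '(' directly when it arrives with no pending close, keeping no stack at all; correctness rests on paren matching being direction-independent.
import Mathlib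
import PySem

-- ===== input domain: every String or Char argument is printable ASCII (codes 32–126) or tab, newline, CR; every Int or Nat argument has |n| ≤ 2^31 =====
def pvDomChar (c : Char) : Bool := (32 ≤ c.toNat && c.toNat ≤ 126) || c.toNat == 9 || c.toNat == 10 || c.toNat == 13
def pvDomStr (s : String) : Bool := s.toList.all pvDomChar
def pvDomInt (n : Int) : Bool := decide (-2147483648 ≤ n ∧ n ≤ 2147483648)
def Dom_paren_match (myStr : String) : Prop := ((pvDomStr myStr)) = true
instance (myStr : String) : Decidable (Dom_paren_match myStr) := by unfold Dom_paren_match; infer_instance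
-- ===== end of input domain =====

-- B scans right-to-left with a pending-close counter instead of A's left-to-right index stack; alternative algorithm, same cost.

-- ===== PORT A =====
-- A's loop body: push index on '(', guarded pop on ')'
def parenStepA (stack : List Int) (p : Int × Char) : List Int :=
  if p.2 = '(' then stack ++ [p.1]
  else if p.2 = ')' then (if stack.length > 0 then stack.dropLast else stack)
  else stack

def paren_match (myStr : String) : Option Int :=
  let stack := (PySem.List.enumerate (PySem.List.slice myStr.toList none (some (-1))) 0).foldl parenStepA []
  if !stack.isEmpty && stack.length == 1 then PySem.List.pyGet? stack 0 else none

-- ===== PORT B =====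
-- B's loop body over (closes, ans, unmatched_opens), fed the characters right-to-left
def parenStepB (s : Nat × Int × Nat) (p : Int × Char) : Nat × Int × Nat :=
  if p.2 = ')' then (s.1 + 1, s.2.1, s.2.2)
  else if p.2 = '(' then
    (if s.1 > 0 then (s.1 - 1, s.2.1, s.2.2) else (s.1, p.1, s.2.2 + 1))
  else s

def paren_match_alt (myStr : String) : Option Int :=
  let l := PySem.List.enumerate (PySem.List.slice myStr.toList none (some (-1))) 0
  let r := l.reverse.foldl parenStepB (0, -1, 0)
  if r.2.2 = 1 then some r.2.1 else none

-- ===== PRECONDITION & SPEC =====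
def Spec_paren_match (myStr : String) (out : Option Int) : Prop := out = paren_match_alt myStr
instance (myStr : String) (out : Option Int) : Decidable (Spec_paren_match myStr out) := by unfold Spec_paren_match; infer_instance

-- ===== CLAIM (what is proved, stated in full; the proofs are below) =====
def Claim_equal_paren_match : Prop := ∀ (myStr : String), Dom_paren_match myStr → Spec_paren_match myStr (paren_match myStr)

-- ===== LEMMAS AND PROOFS =====

-- semantic reduction of a tagged string, given a credit c of pending closes on its right:
-- returns (indices of unmatched opens in order, pending closes left of the block)
def reduceC : List (Int × Char) → Nat → (List Int × Nat)
  | [], c => ([], c)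
  | p :: t, c =>
    let r := reduceC t c
    if p.2 = '(' then (if r.2 > 0 then (r.1, r.2 - 1) else (p.1 :: r.1, r.2))
    else if p.2 = ')' then (r.1, r.2 + 1) else r

-- A's fold from any stack s is: cancel (reduceC l 0).2 elements off s's top, append the unmatched opens
lemma foldA_eq (l : List (Int × Char)) : ∀ (s : List Int),
    l.foldl parenStepA s = s.take (s.length - (reduceC l 0).2) ++ (reduceC l 0).1 := by
  induction l with
  | nil => intro s; simp [reduceC]
  | cons p t ih =>
    intro s
    by_cases hop : p.2 = '('
    · have hA : parenStepA s p = s ++ [p.1] := by simp [parenStepA, hop]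
      rw [List.foldl_cons, hA, ih]
      rcases h2 : (reduceC t 0).2 with _ | c
      · simp [reduceC, hop, h2, List.take_append]
      · simp [reduceC, hop, h2, List.take_append]
    · by_cases hcl : p.2 = ')'
      · cases s with
        | nil =>
          have hA : parenStepA [] p = [] := by simp [parenStepA, hcl]
          rw [List.foldl_cons, hA, ih]
          simp [reduceC, hcl]
        | cons a t' =>
          have hA : parenStepA (a :: t') p = (a :: t').dropLast := by
            simp [parenStepA, hcl]
          rw [List.foldl_cons, hA, ih]
          have h1 : (reduceC (p :: t) 0).1 = (reduceC t 0).1 := by simp [reduceC, hcl]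
          have h2 : (reduceC (p :: t) 0).2 = (reduceC t 0).2 + 1 := by simp [reduceC, hcl]
          rw [h1, h2, List.dropLast_eq_take, List.take_take]
          congr 2
          simp only [List.length_take, List.length_cons]
          omega
      · have hA : parenStepA s p = s := by simp [parenStepA, hop, hcl]
        rw [List.foldl_cons, hA, ih]
        simp [reduceC, hop, hcl]

-- B's right-to-left fold computes reduceC: pending closes, leftmost unmatched open, count of unmatched opens
lemma foldB_eq (l : List (Int × Char)) : ∀ (c : Nat) (a : Int) (k : Nat),
    List.foldr (fun p s => parenStepB s p) (c, a, k) l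
      = ((reduceC l c).2, (reduceC l c).1.headD a, k + (reduceC l c).1.length) := by
  induction l with
  | nil => intro c a k; simp [reduceC]
  | cons p t ih =>
    intro c a k
    rw [List.foldr_cons, ih]
    by_cases hop : p.2 = '('
    · rcases h2 : (reduceC t c).2 with _ | d
      · simp [parenStepB, reduceC, hop, h2]
        omega
      · simp [parenStepB, reduceC, hop, h2]
    · by_cases hcl : p.2 = ')'
      · simp [parenStepB, reduceC, hcl]
      · simp [parenStepB, reduceC, hop, hcl]

-- ===== VERDICT (by name: the statement is the Claim_ definition above) =====
theorem paren_match_spec : Claim_equal_paren_match := by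
  intro myStr _
  unfold Spec_paren_match paren_match paren_match_alt
  set l := PySem.List.enumerate (PySem.List.slice myStr.toList none (some (-1))) 0 with hl
  have hA := foldA_eq l []
  have hB : l.reverse.foldl parenStepB (0, -1, 0)
      = ((reduceC l 0).2, (reduceC l 0).1.headD (-1), (reduceC l 0).1.length) := by
    rw [List.foldl_reverse, foldB_eq]
    simp
  simp only [List.take_nil, List.nil_append, List.length_nil] at hA
  simp only [hA, hB]
  rcases ho : (reduceC l 0).1 with _ | ⟨x, o'⟩
  · simp
  · cases o' with
    | nil => simp [PySem.List.pyGet?, PySem.List.pyIdx?]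
    | cons y o'' => simp
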